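-- pv_equiv track=rewrite | github.com/rsm31/pysys-test | pysys/process/plat-win32/helper.py | __quoteArgument
-- ===== SOURCE A (Python) =====
-- def __quoteArgument(input):
-- 	"""Private method to quote and escape a command line argument correctly for Windows.
--
-- 	The returned value can be added to the end of a command line, with an intervening
-- 	space, and will be treated as a separate argument by the standard Windows command
-- 	line parsers (CommandLineToArgvW and parse_cmdline).  Double quotes, whitespace
-- 	and backslashes in the argument will be preserved for the parser to see them.
--
-- 	Windows' quoting and escaping rules are somewhat complex and the implementation
-- 	of this method was derived from a few different sources:
-- 	https://docs.microsoft.com/en-us/previous-versions/17w5ykft(v=vs.85)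
-- 	http://www.windowsinspired.com/the-correct-way-to-quote-command-line-arguments/
-- 	http://www.windowsinspired.com/understanding-the-command-line-string-and-arguments-received-by-a-windows-program/
-- 	http://www.windowsinspired.com/how-a-windows-programs-splits-its-command-line-into-individual-arguments/
-- 	https://daviddeley.com/autohotkey/parameters/parameters.htm
-- 	This method tries to avoid any areas of different behaviour between the two
-- 	standard parsers, in particular the undocumented rules around handling of
-- 	consecutive unescaped double quote characters.
-- 	"""
-- 	whitespace = None
-- 	# Short-circuit some easy and common cases:
-- 	# - No quotes, no whitespace (just return the input unchanged)
-- 	# - No quotes, no trailing backslash, whitespace (wrap in double quotes)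
-- 	# Everything else falls through to the more complex algorithm
-- 	if '\"' not in input:
-- 		empty = (len(input) == 0)
-- 		whitespace = (empty or ' ' in input or '\t' in input)
-- 		if not whitespace: return input
-- 		if not empty and input[-1] != '\\': return '\"%s\"' % input
-- 	# Make sure we look for whitespace exactly once
-- 	if whitespace is None: whitespace = (' ' in input or '\t' in input)
--
-- 	output = []
-- 	backslash = 0
-- 	for ch in input:
-- 		# Count backslashes until we hit a non-backslash
-- 		if ch == '\\':
-- 			backslash += 1
-- 		elif ch == '\"':
-- 			# Add any pending backslashes (escaped)
-- 			# Then add the escaped double quote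
-- 			output.extend([2 * backslash * '\\', '\\\"'])
-- 			backslash = 0
-- 		else:
-- 			# Add any pending backslashes (unescaped)
-- 			# Then add the next character
-- 			output.extend([backslash * '\\', ch])
-- 			backslash = 0
-- 	if whitespace:
-- 		# Add any pending backslashes (escaped)
-- 		# Wrap the whole argument in double quotes
-- 		output.extend([2 * backslash * '\\', '\"'])
-- 		output.insert(0, '\"')
-- 	else:
-- 		# Add any pending backslashes (unescaped)
-- 		output.append(backslash * '\\')
-- 	return ''.join(output)
-- ===== SOURCE B (Python) =====
-- def _dbl(s):
-- 	"""Double the trailing run of backslashes of s."""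
-- 	return s + '\\' * (len(s) - len(s.rstrip('\\')))
--
-- def __quoteArgument(input):
-- 	# Split on double quotes; each quote becomes an escaped quote, and the
-- 	# backslash run immediately before it (the trailing run of the part) doubles.
-- 	parts = input.split('"')
-- 	escaped = '\\"'.join([_dbl(p) for p in parts[:-1]] + [parts[-1]])
-- 	if len(input) == 0 or ' ' in input or '\t' in input:
-- 		return '"' + _dbl(escaped) + '"'
-- 	return escaped
-- ===== Notes on version B (the rewrite author's own statement) =====
-- stated objective: simpler
-- what changed: Replaces A's short-circuit guards and manual character loop with a running backslash counter by splitting the argument at double-quote characters and joining the pieces with an escaped quote, doubling the trailing backslash run of each piece (and of the whole escaped string when wrapping).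
import Mathlib
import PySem

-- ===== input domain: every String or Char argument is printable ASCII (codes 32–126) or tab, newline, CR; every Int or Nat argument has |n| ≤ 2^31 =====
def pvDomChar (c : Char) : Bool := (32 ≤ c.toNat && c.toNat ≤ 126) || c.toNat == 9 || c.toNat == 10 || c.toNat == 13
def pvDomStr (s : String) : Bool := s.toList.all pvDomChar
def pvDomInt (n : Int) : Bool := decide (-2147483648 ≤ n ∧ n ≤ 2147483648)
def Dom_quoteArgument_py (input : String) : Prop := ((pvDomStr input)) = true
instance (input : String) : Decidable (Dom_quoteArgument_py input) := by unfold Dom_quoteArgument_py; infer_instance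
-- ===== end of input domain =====

-- B replaces A's manual backslash-counting character loop by split-on-quote / join-with-escaped-quote,
-- doubling the trailing backslash run of each piece (objective: simpler).

-- ===== PORT A =====
-- the body of A's `for ch in input` loop: state = (output, backslash)
def pvStepA (st : List (List Char) × Nat) (ch : Char) : List (List Char) × Nat :=
  if ch = '\\' then (st.1, st.2 + 1)
  else if ch = '"' then (st.1 ++ [List.replicate (2 * st.2) '\\', ['\\', '"']], 0)
  else (st.1 ++ [List.replicate st.2 '\\', [ch]], 0)

-- the main algorithm after the loop: wrap or not, then ''.join (= flatten)
def pvMainA (l : List Char) (whitespace : Bool) : String :=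
  let st := l.foldl pvStepA ([], 0)
  if whitespace then
    String.ofList ((['"'] :: (st.1 ++ [List.replicate (2 * st.2) '\\', ['"']])).flatten)
  else
    String.ofList ((st.1 ++ [List.replicate st.2 '\\']).flatten)

def quoteArgument_py (input : String) : String :=
  let l := input.toList
  if '"' ∉ l then
    let empty := l.isEmpty
    let whitespace := empty || decide (' ' ∈ l) || decide ('\t' ∈ l)
    if whitespace = false then input
    else if (!empty) && (l.getLastD ' ' ≠ '\\' : Bool) then
      -- `input[-1] != '\\'`: the getLastD default is unreachable because of `!empty`
      String.ofList ('"' :: (l ++ ['"']))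
    else pvMainA l whitespace
  else
    -- `whitespace is None` here, so it is computed fresh
    pvMainA l (decide (' ' ∈ l) || decide ('\t' ∈ l))

-- ===== PORT B =====
-- s.rstrip('\\')
def pvRstripBS (s : List Char) : List Char := (s.reverse.dropWhile (· = '\\')).reverse

-- _dbl: s + '\\' * (len(s) - len(s.rstrip('\\')))
def pvDbl (s : List Char) : List Char :=
  s ++ List.replicate (s.length - (pvRstripBS s).length) '\\'

-- input.split('"')
def pvSplitQ : List Char → List (List Char)
  | [] => [[]]
  | c :: rest =>
    match pvSplitQ rest with
    | [] => [[]]  -- unreachable: pvSplitQ never returns []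
    | t :: ts => if c = '"' then [] :: t :: ts else (c :: t) :: ts

-- sep.join(pieces)
def pvJoin (sep : List Char) : List (List Char) → List Char
  | [] => []
  | [p] => p
  | p :: rest => p ++ sep ++ pvJoin sep rest

def quoteArgument_py_alt (input : String) : String :=
  let l := input.toList
  let parts := pvSplitQ l
  let escaped := pvJoin ['\\', '"'] (parts.dropLast.map pvDbl ++ [parts.getLastD []])
  if l.isEmpty || decide (' ' ∈ l) || decide ('\t' ∈ l) then
    String.ofList ('"' :: (pvDbl escaped ++ ['"']))
  else String.ofList escaped

-- ===== PRECONDITION & SPEC =====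
def Spec_quoteArgument_py (input : String) (out : String) : Prop := out = quoteArgument_py_alt input
instance (input : String) (out : String) : Decidable (Spec_quoteArgument_py input out) := by unfold Spec_quoteArgument_py; infer_instance

-- ===== CLAIM (what is proved, stated in full; the proofs are below) =====
def Claim_equal_quoteArgument_py : Prop := ∀ (input : String), Dom_quoteArgument_py input → Spec_quoteArgument_py input (quoteArgument_py input)

-- ===== LEMMAS AND PROOFS =====

-- B's escaped string, as a function of the char list
def pvEscB (l : List Char) : List Char :=
  pvJoin ['\\', '"'] ((pvSplitQ l).dropLast.map pvDbl ++ [(pvSplitQ l).getLastD []])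

lemma pvSplitQ_ne_nil (l : List Char) : pvSplitQ l ≠ [] := by
  cases l with
  | nil => simp [pvSplitQ]
  | cons c rest =>
    simp only [pvSplitQ]
    rcases pvSplitQ rest with _ | ⟨t, ts⟩
    · simp
    · by_cases hc : c = '"' <;> simp [hc]

lemma pvSplitQ_no_quote (l : List Char) (h : '"' ∉ l) : pvSplitQ l = [l] := by
  induction l with
  | nil => rfl
  | cons c rest ih =>
    simp only [List.mem_cons, not_or] at h
    simp [pvSplitQ, ih h.2, Ne.symm h.1]

lemma pvSplitQ_concat (l : List Char) (c : Char) :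
    pvSplitQ (l ++ [c]) =
      if c = '"' then pvSplitQ l ++ [[]]
      else (pvSplitQ l).dropLast ++ [(pvSplitQ l).getLastD [] ++ [c]] := by
  induction l with
  | nil => by_cases hc : c = '"' <;> simp [pvSplitQ, hc]
  | cons a rest ih =>
    simp only [List.cons_append, pvSplitQ, ih]
    rcases hr : pvSplitQ rest with _ | ⟨t, ts⟩
    · exact absurd hr (pvSplitQ_ne_nil rest)
    · by_cases hc : c = '"' <;> by_cases ha : a = '"' <;>
        cases ts <;> simp [hc, ha, pvSplitQ]

lemma pvJoin_concat (sep : List Char) (xs : List (List Char)) (y : List Char) (h : xs ≠ []) :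
    pvJoin sep (xs ++ [y]) = pvJoin sep xs ++ sep ++ y := by
  induction xs with
  | nil => exact absurd rfl h
  | cons p rest ih =>
    cases rest with
    | nil => simp [pvJoin]
    | cons q qs =>
      have h2 := ih (by simp)
      simp only [List.cons_append] at h2
      simp only [List.cons_append, pvJoin]
      rw [h2]
      simp [List.append_assoc]

-- dropWhile facts used to compute pvRstripBS on compound strings
lemma pvDropWhile_append (p : Char → Bool) (u : List Char) (a : Char) (tl : List Char)
    (ha : p a = false) :
    List.dropWhile p (u ++ a :: tl) = List.dropWhile p u ++ a :: tl := by
  induction u with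
  | nil => simp [ha]
  | cons b u ih => cases hb : p b <;> simp [hb, ih]

lemma pvDropWhile_replicate (n : Nat) (l : List Char) :
    List.dropWhile (· = '\\') (List.replicate n '\\' ++ l) = List.dropWhile (· = '\\') l := by
  induction n with
  | zero => simp
  | succ n ih => simp [List.replicate_succ, ih]

lemma pvRstrip_no_trail (s : List Char) (h : s.getLast? ≠ some '\\') : pvRstripBS s = s := by
  rcases hs : s.reverse with _ | ⟨a, tl⟩
  · rw [pvRstripBS, hs]
    simp [List.reverse_eq_nil_iff.mp hs]
  · have ha : a ≠ '\\' := fun e => h (by rw [← List.head?_reverse, hs, e]; rfl)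
    rw [pvRstripBS, hs]
    rw [List.dropWhile_cons_of_neg (by simpa using ha), ← hs, List.reverse_reverse]

lemma pvRstrip_len_le (s : List Char) : (pvRstripBS s).length ≤ s.length := by
  have h := (List.dropWhile_sublist (p := (· = '\\')) (l := s.reverse)).length_le
  simpa [pvRstripBS] using h

lemma pvDbl_no_trail (s : List Char) (h : s.getLast? ≠ some '\\') : pvDbl s = s := by
  rw [pvDbl, pvRstrip_no_trail s h]
  simp

lemma pvDbl_append_rep (x : List Char) (n : Nat) (h : x.getLast? ≠ some '\\') :
    pvDbl (x ++ List.replicate n '\\') = x ++ List.replicate (2 * n) '\\' := by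
  have hr : pvRstripBS (x ++ List.replicate n '\\') = x := by
    rw [pvRstripBS, List.reverse_append, List.reverse_replicate, pvDropWhile_replicate]
    rw [show List.dropWhile (· = '\\') x.reverse = (pvRstripBS x).reverse by
          rw [pvRstripBS, List.reverse_reverse]]
    rw [List.reverse_reverse, pvRstrip_no_trail x h]
  rw [pvDbl, hr]
  simp only [List.length_append, List.length_replicate]
  rw [show x.length + n - x.length = n by omega, List.append_assoc, ← List.replicate_add,
      two_mul]

lemma pvDbl_append_of_last (x y : List Char) (c : Char) (hx : x.getLast? = some c)
    (hc : c ≠ '\\') : pvDbl (x ++ y) = x ++ pvDbl y := by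
  rcases hs : x.reverse with _ | ⟨a, tl⟩
  · rw [List.reverse_eq_nil_iff.mp hs] at hx
    simp at hx
  · have hac : a = c := by
      have := hx
      rw [← List.head?_reverse, hs] at this
      simpa using this
    have hr : pvRstripBS (x ++ y) = x ++ pvRstripBS y := by
      rw [pvRstripBS, List.reverse_append, hs,
          pvDropWhile_append _ _ _ _ (by simp [hac, hc]),
          List.reverse_append, ← hs, List.reverse_reverse, pvRstripBS]
    have hle := pvRstrip_len_le y
    rw [pvDbl, hr, pvDbl]
    simp only [List.length_append]
    rw [show x.length + y.length - (x.length + (pvRstripBS y).length)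
          = y.length - (pvRstripBS y).length by omega, List.append_assoc]

lemma pvEscB_no_quote (l : List Char) (h : '"' ∉ l) : pvEscB l = l := by
  simp [pvEscB, pvSplitQ_no_quote l h, pvJoin]

lemma pvEscB_concat_other (l : List Char) (c : Char) (hc : c ≠ '"') :
    pvEscB (l ++ [c]) = pvEscB l ++ [c] := by
  unfold pvEscB
  rw [pvSplitQ_concat, if_neg hc]
  rcases hP : (pvSplitQ l).dropLast with _ | ⟨m, ms⟩
  · simp [pvJoin]
  · rw [List.dropLast_concat, List.getLastD_concat]
    rw [pvJoin_concat _ _ _ (by simp), pvJoin_concat _ _ _ (by simp)]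
    simp [List.append_assoc]

lemma pvDbl_pvJoin (M : List (List Char)) (y : List Char) :
    pvDbl (pvJoin ['\\', '"'] (M ++ [y])) = pvJoin ['\\', '"'] (M ++ [pvDbl y]) := by
  cases M with
  | nil => simp [pvJoin]
  | cons m ms =>
    rw [pvJoin_concat _ _ _ (by simp), pvJoin_concat _ _ _ (by simp)]
    have hq : (pvJoin ['\\', '"'] (m :: ms) ++ ['\\', '"']).getLast? = some '"' := by
      rw [show (['\\', '"'] : List Char) = ['\\'] ++ ['"'] from rfl, ← List.append_assoc]
      exact List.getLast?_concat
    exact pvDbl_append_of_last _ _ '"' hq (by decide)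

lemma pvEscB_concat_quote (l : List Char) :
    pvEscB (l ++ ['"']) = pvDbl (pvEscB l) ++ ['\\', '"'] := by
  unfold pvEscB
  rw [pvSplitQ_concat, if_pos rfl,
      show (pvSplitQ l ++ [([] : List Char)]).dropLast = pvSplitQ l from List.dropLast_concat ..,
      show (pvSplitQ l ++ [([] : List Char)]).getLastD [] = [] from List.getLastD_concat ..]
  have hP : (pvSplitQ l).dropLast ++ [(pvSplitQ l).getLastD []] = pvSplitQ l := by
    rcases h' : (pvSplitQ l).getLast? with _ | v
    · exact absurd (List.getLast?_eq_none_iff.mp h') (pvSplitQ_ne_nil l)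
    · rw [List.getLastD_eq_getLast?, h']
      simpa using List.dropLast_append_getLast? v h'
  conv_lhs => rw [← hP]
  rw [List.map_append, List.map_cons, List.map_nil,
      pvJoin_concat _ _ _ (by simp),
      ← pvDbl_pvJoin]
  simp

-- The central invariant: B's escaped string equals A's loop output plus pending backslashes,
-- and A's accumulated output never ends in a backslash.
lemma pvInv (l : List Char) :
    pvEscB l = (l.foldl pvStepA ([], 0)).1.flatten
        ++ List.replicate (l.foldl pvStepA ([], 0)).2 '\\'
    ∧ (l.foldl pvStepA ([], 0)).1.flatten.getLast? ≠ some '\\' := by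
  induction l using List.reverseRecOn with
  | nil => constructor <;> simp [pvEscB, pvSplitQ, pvJoin]
  | append_singleton l c ih =>
    obtain ⟨ih1, ih2⟩ := ih
    rw [List.foldl_append]
    simp only [List.foldl_cons, List.foldl_nil]
    by_cases hbs : c = '\\'
    · subst hbs
      constructor
      · rw [pvEscB_concat_other l _ (by decide), ih1, pvStepA, if_pos rfl]
        simp [List.replicate_succ', List.append_assoc]
      · rw [pvStepA, if_pos rfl]; exact ih2
    · by_cases hq : c = '"'
      · subst hq
        rw [pvStepA, if_neg (by decide), if_pos rfl]
        constructor
        · rw [pvEscB_concat_quote, ih1, pvDbl_append_rep _ _ ih2]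
          simp [List.append_assoc]
        · simp
      · rw [pvStepA, if_neg hbs, if_neg hq]
        constructor
        · rw [pvEscB_concat_other l c hq, ih1]
          simp [List.append_assoc]
        · simp [hbs]

lemma pvAlt_wrap (input : String)
    (h : (input.toList.isEmpty || decide (' ' ∈ input.toList) || decide ('\t' ∈ input.toList)) = true) :
    quoteArgument_py_alt input = String.ofList ('"' :: (pvDbl (pvEscB input.toList) ++ ['"'])) := by
  unfold quoteArgument_py_alt
  simp only [pvEscB, h, if_true]

lemma pvAlt_nowrap (input : String)
    (h : (input.toList.isEmpty || decide (' ' ∈ input.toList) || decide ('\t' ∈ input.toList)) = false) :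
    quoteArgument_py_alt input = String.ofList (pvEscB input.toList) := by
  unfold quoteArgument_py_alt
  simp only [pvEscB, h, Bool.false_eq_true, if_false]

lemma pvMainA_wrap (l : List Char) :
    pvMainA l true = String.ofList ('"' :: (pvDbl (pvEscB l) ++ ['"'])) := by
  obtain ⟨h1, h2⟩ := pvInv l
  have h3 : pvDbl (pvEscB l) = (l.foldl pvStepA ([], 0)).1.flatten
      ++ List.replicate (2 * (l.foldl pvStepA ([], 0)).2) '\\' := by
    rw [h1]; exact pvDbl_append_rep _ _ h2
  simp [pvMainA, h3, List.append_assoc]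

lemma pvMainA_nowrap (l : List Char) :
    pvMainA l false = String.ofList (pvEscB l) := by
  obtain ⟨h1, h2⟩ := pvInv l
  simp [pvMainA, h1]

-- ===== VERDICT (by name: the statement is the Claim_ definition above) =====
theorem quoteArgument_py_spec : Claim_equal_quoteArgument_py := by
  intro input _
  unfold Spec_quoteArgument_py quoteArgument_py
  by_cases hq : '"' ∈ input.toList
  · rw [if_neg (fun hn => hn hq)]
    have hne' : input.toList ≠ [] := List.ne_nil_of_mem hq
    have hne : input.toList.isEmpty = false := by
      cases h : input.toList with
      | nil => exact absurd h hne'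
      | cons a t => rfl
    by_cases hw : (decide (' ' ∈ input.toList) || decide ('\t' ∈ input.toList)) = true
    · rw [hw, pvMainA_wrap, pvAlt_wrap input (by simp [hne, Bool.or_eq_true] at hw ⊢; tauto)]
    · rw [Bool.not_eq_true] at hw
      rw [hw, pvMainA_nowrap, pvAlt_nowrap input (by simp [hne, Bool.or_eq_false_iff] at hw ⊢; tauto)]
  · rw [if_pos hq]
    by_cases hws : (input.toList.isEmpty || decide (' ' ∈ input.toList) || decide ('\t' ∈ input.toList)) = true
    · rw [if_neg (by simp [hws])]
      by_cases hlast : (!input.toList.isEmpty && decide (input.toList.getLastD ' ' ≠ '\\')) = true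
      · rw [if_pos hlast]
        obtain ⟨hne, hld⟩ := Bool.and_eq_true_iff.mp hlast
        have hl2 : input.toList.getLast? ≠ some '\\' := by
          intro hsome
          exact (of_decide_eq_true hld) (by rw [List.getLastD_eq_getLast?, hsome]; rfl)
        rw [pvAlt_wrap input hws, pvEscB_no_quote _ hq, pvDbl_no_trail _ hl2]
      · rw [if_neg hlast, hws, pvMainA_wrap, pvAlt_wrap input hws]
    · rw [Bool.not_eq_true] at hws
      rw [if_pos hws, pvAlt_nowrap input hws, pvEscB_no_quote _ hq]
      exact String.ofList_toList.symm
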